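-- pv_equiv track=rewrite | github.com/joaoabreu5/PL-TPCs | TPC1/TPC1.py | dist_sexo
-- ===== SOURCE A (Python) =====
-- def dist_sexo(data):
--     dist_sexo = dict()
--     dist_sexo['Masculino'] = 0
--     dist_sexo['Feminino'] = 0
--
--     for tuplo in data:
--         sexo = tuplo[1]
--         if sexo == 'M':
--             dist_sexo['Masculino'] += 1
--         elif sexo == 'F':
--             dist_sexo['Feminino'] += 1
--
--     return dist_sexo
-- ===== SOURCE B (Python) =====
-- def dist_sexo(data):
--     sexos = [t[1] for t in data]
--     return {'Masculino': sexos.count('M'), 'Feminino': sexos.count('F')}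
-- ===== Notes on version B (the rewrite author's own statement) =====
-- stated objective: idiomatic
-- what changed: Replaces the per-element if/elif counting loop over a pre-seeded dict with extracting the second components once and building the result dict directly from two list.count calls.
import Mathlib
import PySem

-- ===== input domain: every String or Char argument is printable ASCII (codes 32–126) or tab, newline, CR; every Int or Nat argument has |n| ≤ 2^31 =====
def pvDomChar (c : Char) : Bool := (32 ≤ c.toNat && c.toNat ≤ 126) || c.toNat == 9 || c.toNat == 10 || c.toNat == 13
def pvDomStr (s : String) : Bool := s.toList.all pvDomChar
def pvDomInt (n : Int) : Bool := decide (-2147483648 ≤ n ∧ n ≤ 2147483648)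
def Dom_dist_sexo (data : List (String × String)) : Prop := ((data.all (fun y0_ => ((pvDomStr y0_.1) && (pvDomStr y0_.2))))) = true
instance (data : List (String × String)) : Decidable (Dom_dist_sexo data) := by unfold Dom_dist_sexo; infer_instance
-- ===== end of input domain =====

-- B replaces A's per-element if/elif counting loop with one map and two list.count calls (idiomatic; same O(n) cost).


-- ===== PORT A =====
-- literal transliteration of A: seed the dict with both keys at 0, then bump per element
def dist_sexo (data : List (String × String)) : List (String × Int) :=
  let d : PySem.Dict String Int := PySem.Dict.empty
  let d := d.insert "Masculino" 0
  let d := d.insert "Feminino" 0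
  let d := data.foldl (fun d tuplo =>
    let sexo := tuplo.2
    if sexo = "M" then d.insert "Masculino" (d.getD "Masculino" 0 + 1)
    else if sexo = "F" then d.insert "Feminino" (d.getD "Feminino" 0 + 1)
    else d) d
  d.items

-- ===== PORT B =====
def dist_sexo_alt (data : List (String × String)) : List (String × Int) :=
  let sexos := data.map (fun t => t.2)
  [("Masculino", (PySem.List.count sexos "M" : Int)), ("Feminino", (PySem.List.count sexos "F" : Int))]

-- ===== PRECONDITION & SPEC =====
def Spec_dist_sexo (data : List (String × String)) (out : List (String × Int)) : Prop := out = dist_sexo_alt data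
instance (data : List (String × String)) (out : List (String × Int)) : Decidable (Spec_dist_sexo data out) := by unfold Spec_dist_sexo; infer_instance

-- ===== CLAIM (what is proved, stated in full; the proofs are below) =====
def Claim_equal_dist_sexo : Prop := ∀ (data : List (String × String)), Dom_dist_sexo data → Spec_dist_sexo data (dist_sexo data)

-- ===== LEMMAS AND PROOFS =====
-- Loop invariant for A's fold: starting from the two-key dict with counts m, f, the fold
-- adds the number of "M" / "F" second components.
lemma dist_sexo_loop (data : List (String × String)) (m f : Int) :
    data.foldl (fun d tuplo =>
      let sexo := tuplo.2
      if sexo = "M" then d.insert "Masculino" (d.getD "Masculino" 0 + 1)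
      else if sexo = "F" then d.insert "Feminino" (d.getD "Feminino" 0 + 1)
      else d) (PySem.Dict.mk [("Masculino", m), ("Feminino", f)])
    = PySem.Dict.mk [("Masculino", m + ((data.map (fun t => t.2)).count "M" : Int)),
                     ("Feminino", f + ((data.map (fun t => t.2)).count "F" : Int))] := by
  induction data generalizing m f with
  | nil => simp
  | cons hd tl ih =>
    simp only [List.foldl_cons, List.map_cons]
    by_cases hM : hd.2 = "M"
    · rw [hM]; simp only [String.reduceEq, reduceIte]
      have : (PySem.Dict.mk [("Masculino", m), ("Feminino", f)]).insert "Masculino"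
          ((PySem.Dict.mk [("Masculino", m), ("Feminino", f)]).getD "Masculino" 0 + 1)
          = PySem.Dict.mk [("Masculino", m + 1), ("Feminino", f)] := by
        apply PySem.Dict.ext
        simp [PySem.Dict.items_insert, PySem.Dict.getD_eq_get?_getD, PySem.Dict.get?_mk_cons,
          PySem.Dict.contains_mk]
      rw [this, ih]
      simp only [List.count_cons, PySem.Dict.mk.injEq, List.cons.injEq, Prod.mk.injEq]
      simp
      omega
    · by_cases hF : hd.2 = "F"
      · rw [hF]; simp only [String.reduceEq, reduceIte]
        have : (PySem.Dict.mk [("Masculino", m), ("Feminino", f)]).insert "Feminino"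
            ((PySem.Dict.mk [("Masculino", m), ("Feminino", f)]).getD "Feminino" 0 + 1)
            = PySem.Dict.mk [("Masculino", m), ("Feminino", f + 1)] := by
          apply PySem.Dict.ext
          simp [PySem.Dict.items_insert, PySem.Dict.getD_eq_get?_getD, PySem.Dict.get?_mk_cons,
            PySem.Dict.contains_mk]
        rw [this, ih]
        simp only [List.count_cons, PySem.Dict.mk.injEq, List.cons.injEq, Prod.mk.injEq]
        simp
        omega
      · simp only [if_neg hM, if_neg hF]
        rw [ih]
        simp [hM, hF]

-- ===== VERDICT (by name: the statement is the Claim_ definition above) =====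
theorem dist_sexo_spec : Claim_equal_dist_sexo := by
  intro data _
  unfold Spec_dist_sexo dist_sexo dist_sexo_alt
  have h0 : (PySem.Dict.empty.insert "Masculino" 0).insert "Feminino" (0 : Int)
      = PySem.Dict.mk [("Masculino", 0), ("Feminino", 0)] := by decide
  simp only [h0, dist_sexo_loop]
  simp [PySem.List.count_eq]
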